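-- pv_equiv track=rewrite | github.com/carrissaconstructivemetabolic667/AutoVideoCraft | src/autovideocraft/utils.py | srt_to_vtt
-- ===== SOURCE A (Python) =====
-- def srt_to_vtt(srt_content: str) -> str:
--     """
--     Convert SRT format to WebVTT format for browser subtitle rendering.
--
--     Args:
--         srt_content: Raw SRT subtitle content string.
--
--     Returns:
--         VTT-formatted subtitle string.
--     """
--     lines = srt_content.strip().split("\n")
--     vtt_lines = ["WEBVTT", ""]  # VTT header
--     i = 0
--
--     while i < len(lines):
--         line = lines[i].strip()
--         if line.isdigit():
--             # SRT index - skip it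
--             i += 1
--             if i < len(lines) and "-->" in lines[i]:
--                 # Convert SRT timestamp (HH:MM:SS,mmm) to VTT (HH:MM:SS.mmm)
--                 vtt_time = lines[i].strip().replace(",", ".")
--                 vtt_lines.append(vtt_time)
--                 i += 1
--                 # Collect text lines until blank line or end
--                 while i < len(lines) and lines[i].strip():
--                     vtt_lines.append(lines[i].strip())
--                     i += 1
--                 vtt_lines.append("")  # blank line separator
--         elif "-->" in line:
--             # Convert SRT timestamp to VTT
--             vtt_time = line.replace(",", ".")
--             vtt_lines.append(vtt_time)
--             i += 1
--             # Collect text lines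
--             while i < len(lines) and lines[i].strip():
--                 vtt_lines.append(lines[i].strip())
--                 i += 1
--             vtt_lines.append("")
--         else:
--             i += 1
--
--     return "\n".join(vtt_lines)
-- ===== SOURCE B (Python) =====
-- def _blocks(stripped_lines):
--     """Partition stripped lines into maximal runs of non-blank lines."""
--     blocks, cur = [], []
--     for s in stripped_lines:
--         if s:
--             cur.append(s)
--         elif cur:
--             blocks.append(cur)
--             cur = []
--     if cur:
--         blocks.append(cur)
--     return blocks
--
--
-- def srt_to_vtt(srt_content: str) -> str:
--     out = ["WEBVTT", ""]
--     for block in _blocks([ln.strip() for ln in srt_content.strip().split("\n")]):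
--         # emit the block from its first timestamp line on; blocks without one vanish
--         for j, ln in enumerate(block):
--             if "-->" in ln:
--                 out.append(ln.replace(",", "."))
--                 out.extend(block[j + 1:])
--                 out.append("")
--                 break
--     return "\n".join(out)
-- ===== Notes on version B (the rewrite author's own statement) =====
-- stated objective: simpler
-- what changed: Replaces A's index-driven while loop with digit-index/bare-timestamp branches and nested collect loops by a two-phase decomposition: partition the stripped lines into blank-separated blocks, then emit each block from its first '-->' line on (a block without one vanishes).
import Mathlib
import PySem

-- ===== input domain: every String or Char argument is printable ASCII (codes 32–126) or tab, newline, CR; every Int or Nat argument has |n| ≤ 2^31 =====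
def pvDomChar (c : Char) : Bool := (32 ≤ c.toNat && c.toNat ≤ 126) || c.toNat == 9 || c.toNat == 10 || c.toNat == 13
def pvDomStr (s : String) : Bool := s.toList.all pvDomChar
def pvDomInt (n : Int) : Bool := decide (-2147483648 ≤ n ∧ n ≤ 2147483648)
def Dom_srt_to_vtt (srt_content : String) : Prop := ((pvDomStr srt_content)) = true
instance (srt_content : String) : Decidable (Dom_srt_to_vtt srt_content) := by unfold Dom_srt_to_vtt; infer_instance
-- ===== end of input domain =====

-- B replaces A's index-driven while loop (with its digit-index / bare-timestamp branches) by a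
-- two-phase decomposition: partition the stripped lines into blank-separated blocks, then emit each
-- block from its first '-->' line on.  Objective: simpler; same O(n) cost.

-- ===== PORT A =====
-- inner `while i < len(lines) and lines[i].strip(): append lines[i].strip(); i += 1`
-- returns (collected stripped text lines, remaining suffix of lines)
def pvCollectA : List (List Char) → List (List Char) × List (List Char)
  | [] => ([], [])
  | l :: rest =>
    if PySem.Chars.strip l ≠ [] then
      let p := pvCollectA rest
      (PySem.Chars.strip l :: p.1, p.2)
    else ([], l :: rest)

theorem pvCollectA_len (xs : List (List Char)) : (pvCollectA xs).2.length ≤ xs.length := by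
  induction xs with
  | nil => simp [pvCollectA]
  | cons l rest ih =>
    simp only [pvCollectA]
    split_ifs with h
    · simpa using Nat.le_succ_of_le ih
    · simp

-- the outer `while i < len(lines)` loop, as structural recursion on the line suffix
def pvALoop : List (List Char) → List (List Char)
  | [] => []
  | l :: rest =>
    let line := PySem.Chars.strip l
    if PySem.Chars.strIsdigit line then
      match rest with
      | [] => []
      | l2 :: rest2 =>
        if PySem.Chars.isIn ['-', '-', '>'] l2 then
          let p := pvCollectA rest2
          PySem.Chars.replace (PySem.Chars.strip l2) [','] ['.'] :: (p.1 ++ [[]] ++ pvALoop p.2)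
        else pvALoop (l2 :: rest2)
    else if PySem.Chars.isIn ['-', '-', '>'] line then
      let p := pvCollectA rest
      PySem.Chars.replace line [','] ['.'] :: (p.1 ++ [[]] ++ pvALoop p.2)
    else pvALoop rest
termination_by xs => xs.length
decreasing_by
  · have := pvCollectA_len rest2; simp; omega
  · simp
  · have := pvCollectA_len rest; simp; omega
  · simp

def srt_to_vtt (srt_content : String) : String :=
  String.ofList (PySem.Chars.join ['\n']
    ("WEBVTT".toList :: [] ::
      pvALoop (PySem.Chars.splitOn (PySem.Chars.strip srt_content.toList) ['\n'])))

-- ===== PORT B =====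
-- first '-->' line of a block starts the cue; earlier lines are dropped, a block without one vanishes
def pvEmitBlock : List (List Char) → List (List Char)
  | [] => []
  | ln :: rest =>
    if PySem.Chars.isIn ['-', '-', '>'] ln then
      PySem.Chars.replace ln [','] ['.'] :: (rest ++ [[]])
    else pvEmitBlock rest

-- the `for s in stripped_lines` body of _blocks, state = (blocks, cur)
def pvBlocksStep (acc : List (List (List Char)) × List (List Char)) (s : List Char) :
    List (List (List Char)) × List (List Char) :=
  if s ≠ [] then (acc.1, acc.2 ++ [s])
  else if acc.2 ≠ [] then (acc.1 ++ [acc.2], []) else acc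

def pvBlocks (ls : List (List Char)) : List (List (List Char)) :=
  if (ls.foldl pvBlocksStep ([], [])).2 ≠ [] then
    (ls.foldl pvBlocksStep ([], [])).1 ++ [(ls.foldl pvBlocksStep ([], [])).2]
  else (ls.foldl pvBlocksStep ([], [])).1

def srt_to_vtt_alt (srt_content : String) : String :=
  String.ofList (PySem.Chars.join ['\n']
    ((pvBlocks ((PySem.Chars.splitOn (PySem.Chars.strip srt_content.toList) ['\n']).map
        PySem.Chars.strip)).foldl (fun acc b => acc ++ pvEmitBlock b) ["WEBVTT".toList, []]))

-- ===== PRECONDITION & SPEC =====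
def Spec_srt_to_vtt (srt_content : String) (out : String) : Prop := out = srt_to_vtt_alt srt_content
instance (srt_content : String) (out : String) : Decidable (Spec_srt_to_vtt srt_content out) := by unfold Spec_srt_to_vtt; infer_instance

-- ===== CLAIM (what is proved, stated in full; the proofs are below) =====
def Claim_equal_srt_to_vtt : Prop := ∀ (srt_content : String), Dom_srt_to_vtt srt_content → Spec_srt_to_vtt srt_content (srt_to_vtt srt_content)

-- ===== LEMMAS AND PROOFS =====

theorem pvInfix_dropWhile {t cs : List Char} (ht : t ≠ [])
    (hns : ∀ c ∈ t, PySem.Chars.isspace c = false) :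
    t <:+: cs → t <:+: cs.dropWhile PySem.Chars.isspace := by
  induction cs with
  | nil => intro h; simpa using h
  | cons c cs ih =>
    intro h
    by_cases hws : PySem.Chars.isspace c = true
    · rw [List.dropWhile_cons_of_pos hws]
      apply ih
      obtain ⟨u, v, huv⟩ := h
      match u with
      | [] =>
        exfalso
        match t, ht with
        | t0 :: t', _ =>
          simp only [List.nil_append, List.cons_append, List.cons.injEq] at huv
          have := hns t0 (by simp)
          rw [huv.1] at this; rw [this] at hws; exact Bool.false_ne_true hws
      | u0 :: u' =>
        simp only [List.cons_append, List.cons.injEq] at huv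
        exact ⟨u', v, huv.2⟩
    · rw [List.dropWhile_cons_of_neg hws]
      exact h

theorem pvArrow_strip (l : List Char) :
    PySem.Chars.isIn ['-', '-', '>'] (PySem.Chars.strip l) = PySem.Chars.isIn ['-', '-', '>'] l := by
  have hns : ∀ c ∈ ['-', '-', '>'], PySem.Chars.isspace c = false := by
    intro c hc; fin_cases hc <;> decide
  by_cases h : PySem.Chars.isIn ['-', '-', '>'] l = true
  · rw [h]
    rw [PySem.Chars.isIn_iff_infix] at h ⊢
    unfold PySem.Chars.strip PySem.Chars.lstrip PySem.Chars.rstrip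
    have h1 : ['-', '-', '>'] <:+: List.dropWhile PySem.Chars.isspace l :=
      pvInfix_dropWhile (by simp) hns h
    have h2 := pvInfix_dropWhile (t := ['-', '-', '>'].reverse) (by simp)
      (by intro c hc; fin_cases hc <;> decide) (List.reverse_infix.mpr h1)
    simpa using List.reverse_infix.mpr h2
  · rw [Bool.not_eq_true] at h
    rw [h]
    rw [PySem.Chars.isIn_eq_false_iff] at h ⊢
    intro hi
    apply h
    have hsub : PySem.Chars.strip l <:+: l := by
      unfold PySem.Chars.strip PySem.Chars.lstrip PySem.Chars.rstrip
      have h0 : List.dropWhile PySem.Chars.isspace (List.dropWhile PySem.Chars.isspace l).reverse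
          <:+: (List.dropWhile PySem.Chars.isspace l).reverse :=
        (List.dropWhile_suffix _).isInfix
      have h1 : (List.dropWhile PySem.Chars.isspace (List.dropWhile PySem.Chars.isspace l).reverse).reverse
          <:+: List.dropWhile PySem.Chars.isspace l :=
        List.reverse_infix.mp (by simpa using h0)
      exact h1.trans (List.dropWhile_suffix _).isInfix
    exact hi.trans hsub

theorem pvDigit_no_arrow (s : List Char) (h : PySem.Chars.strIsdigit s = true) :
    PySem.Chars.isIn ['-', '-', '>'] s = false := by
  rw [PySem.Chars.isIn_eq_false_iff]
  intro hi
  have hm : '-' ∈ s := hi.subset (by simp)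
  unfold PySem.Chars.strIsdigit at h
  simp only [Bool.and_eq_true, List.all_eq_true] at h
  have := h.2 '-' hm
  simp [PySem.Chars.isdigit] at this

theorem pvArrow_strip_ne (l : List Char) (h : PySem.Chars.isIn ['-', '-', '>'] l = true) :
    PySem.Chars.strip l ≠ [] := by
  intro hnil
  rw [← pvArrow_strip, hnil] at h
  exact absurd h (by decide)


def pvGroups : List (List Char) → List (List Char) → List (List (List Char))
  | cur, [] => if cur = [] then [] else [cur]
  | cur, s :: rest =>
    if s ≠ [] then pvGroups (cur ++ [s]) rest
    else if cur = [] then pvGroups [] rest else cur :: pvGroups [] rest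

theorem pvBlocks_foldl (ls : List (List Char)) (bs : List (List (List Char))) (cur : List (List Char)) :
    (if (ls.foldl pvBlocksStep (bs, cur)).2 ≠ [] then
      (ls.foldl pvBlocksStep (bs, cur)).1 ++ [(ls.foldl pvBlocksStep (bs, cur)).2]
    else (ls.foldl pvBlocksStep (bs, cur)).1)
    = bs ++ pvGroups cur ls := by
  induction ls generalizing bs cur with
  | nil => by_cases h : cur = [] <;> simp [pvGroups, h]
  | cons s rest ih =>
    simp only [List.foldl_cons, pvBlocksStep, pvGroups]
    by_cases hs : s = []
    · by_cases hc : cur = [] <;> simp [hs, hc, ih]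
    · simp [hs, ih]

def pvAfter : List (List Char) → List (List (List Char))
  | [] => []
  | _ :: r2 => pvGroups [] (r2.map PySem.Chars.strip)

theorem pvEmitBlock_append (pre ys : List (List Char))
    (h : ∀ s ∈ pre, PySem.Chars.isIn ['-', '-', '>'] s = false) :
    pvEmitBlock (pre ++ ys) = pvEmitBlock ys := by
  induction pre with
  | nil => rfl
  | cons p pre ih =>
    have hp := h p (by simp)
    simp only [List.cons_append, pvEmitBlock, hp]
    exact ih (fun s hs => h s (by simp [hs]))

theorem pvGroups_run (xs : List (List Char)) (cur : List (List Char)) (hc : cur ≠ []) :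
    pvGroups cur (xs.map PySem.Chars.strip)
      = (cur ++ (pvCollectA xs).1) :: pvAfter (pvCollectA xs).2 := by
  induction xs generalizing cur with
  | nil => simp [pvGroups, pvCollectA, pvAfter, hc]
  | cons x xs ih =>
    by_cases hx : PySem.Chars.strip x = []
    · simp [pvGroups, pvCollectA, pvAfter, hx, hc]
    · simp only [List.map_cons, pvGroups, pvCollectA, hx, if_pos, ne_eq,
        not_false_iff]
      rw [ih (cur ++ [PySem.Chars.strip x]) (by simp)]
      simp

theorem pvCollectA_snd (xs : List (List Char)) :
    (pvCollectA xs).2 = [] ∨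
      ∃ b r2, (pvCollectA xs).2 = b :: r2 ∧ PySem.Chars.strip b = [] := by
  induction xs with
  | nil => left; rfl
  | cons x xs ih =>
    by_cases hx : PySem.Chars.strip x = []
    · right; exact ⟨x, xs, by simp [pvCollectA, hx], hx⟩
    · simpa [pvCollectA, hx] using ih

theorem pvMain_nil (cur : List (List Char))
    (hcur : ∀ s ∈ cur, PySem.Chars.isIn ['-', '-', '>'] s = false) :
    pvALoop [] = (pvGroups cur ([].map PySem.Chars.strip)).flatMap pvEmitBlock := by
  by_cases hc : cur = []
  · simp [hc, pvALoop, pvGroups]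
  · have h := pvEmitBlock_append cur [] hcur
    simp only [List.append_nil] at h
    simp [hc, pvALoop, pvGroups, h, pvEmitBlock]

theorem pvMain (n : Nat) : ∀ (ls : List (List Char)) (cur : List (List Char)), ls.length ≤ n →
    (∀ s ∈ cur, PySem.Chars.isIn ['-', '-', '>'] s = false) →
    pvALoop ls = (pvGroups cur (ls.map PySem.Chars.strip)).flatMap pvEmitBlock := by
  induction n with
  | zero =>
    intro ls cur hlen hcur
    have hnil : ls = [] := List.eq_nil_of_length_eq_zero (Nat.le_zero.mp hlen)
    subst hnil
    exact pvMain_nil cur hcur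
  | succ n ih =>
    intro ls cur hlen hcur
    -- after a cue's text run, A resumes at the remainder, B at the remaining blocks
    have tail : ∀ (xs : List (List Char)), xs.length ≤ n →
        pvALoop (pvCollectA xs).2 = (pvAfter (pvCollectA xs).2).flatMap pvEmitBlock := by
      intro xs hxs
      rcases pvCollectA_snd xs with hr | ⟨b, r2, hr, hb⟩
      · rw [hr]; simp [pvALoop, pvAfter]
      · rw [hr]
        have hlen2 : (b :: r2).length ≤ n := by
          have h1 := pvCollectA_len xs; rw [hr] at h1; omega
        rw [ih (b :: r2) [] hlen2 (by simp)]
        simp [pvAfter, pvGroups, hb]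
    match ls with
    | [] => exact pvMain_nil cur hcur
    | l :: rest =>
      have hrest : rest.length ≤ n := by simp at hlen; omega
      by_cases h0 : PySem.Chars.strip l = []
      · -- blank separator line
        have hlhs : pvALoop (l :: rest) = pvALoop rest := by
          rw [pvALoop.eq_def]
          simp [h0, PySem.Chars.strIsdigit,
            show PySem.Chars.isIn ['-', '-', '>'] ([] : List Char) = false from by decide]
        rw [hlhs]
        simp only [List.map_cons, h0]
        by_cases hc : cur = []
        · subst hc
          rw [show pvGroups [] ([] :: List.map PySem.Chars.strip rest)
              = pvGroups [] (List.map PySem.Chars.strip rest) from by simp [pvGroups]]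
          exact ih rest [] hrest (by simp)
        · rw [show pvGroups cur ([] :: List.map PySem.Chars.strip rest)
              = cur :: pvGroups [] (List.map PySem.Chars.strip rest) from by simp [pvGroups, hc]]
          have hemit := pvEmitBlock_append cur [] hcur
          simp only [List.append_nil] at hemit
          simp [hemit, pvEmitBlock, ih rest [] hrest (by simp)]
      · -- non-blank line
        by_cases hd : PySem.Chars.strIsdigit (PySem.Chars.strip l) = true
        · match rest with
          | [] =>
            rw [show pvALoop [l] = [] from by rw [pvALoop.eq_def]; simp [hd]]
            have hna := pvDigit_no_arrow _ hd
            have hemit := pvEmitBlock_append (cur ++ [PySem.Chars.strip l]) []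
              (by intro s hs
                  rcases List.mem_append.mp hs with h | h
                  · exact hcur s h
                  · simp at h; subst h; exact hna)
            simp only [List.append_nil] at hemit
            simp [pvGroups, h0, hemit, pvEmitBlock]
          | l2 :: rest2 =>
            have hrest2 : rest2.length ≤ n := by simp at hlen; omega
            have hcur' : ∀ s ∈ cur ++ [PySem.Chars.strip l],
                PySem.Chars.isIn ['-', '-', '>'] s = false := by
              intro s hs
              rcases List.mem_append.mp hs with h | h
              · exact hcur s h
              · simp at h; subst h; exact pvDigit_no_arrow _ hd
            by_cases ha : PySem.Chars.isIn ['-', '-', '>'] l2 = true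
            · -- digit index followed by a timestamp line
              rw [show pvALoop (l :: l2 :: rest2)
                  = PySem.Chars.replace (PySem.Chars.strip l2) [','] ['.'] ::
                    ((pvCollectA rest2).1 ++ [[]] ++ pvALoop (pvCollectA rest2).2) from by
                rw [pvALoop.eq_def]; simp [hd, ha]]
              have hl2 : PySem.Chars.strip l2 ≠ [] := pvArrow_strip_ne l2 ha
              simp only [List.map_cons]
              rw [show pvGroups cur (PySem.Chars.strip l :: PySem.Chars.strip l2 ::
                    List.map PySem.Chars.strip rest2)
                  = pvGroups (cur ++ [PySem.Chars.strip l] ++ [PySem.Chars.strip l2])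
                    (List.map PySem.Chars.strip rest2) from by simp [pvGroups, h0, hl2]]
              rw [pvGroups_run rest2 _ (by simp)]
              rw [List.flatMap_cons]
              rw [show cur ++ [PySem.Chars.strip l] ++ [PySem.Chars.strip l2]
                    ++ (pvCollectA rest2).1
                  = (cur ++ [PySem.Chars.strip l])
                    ++ (PySem.Chars.strip l2 :: (pvCollectA rest2).1) from by simp]
              rw [pvEmitBlock_append _ _ hcur']
              have harrs : PySem.Chars.isIn ['-', '-', '>'] (PySem.Chars.strip l2) = true := by
                rw [pvArrow_strip]; exact ha
              simp only [pvEmitBlock, harrs, if_true]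
              rw [tail rest2 hrest2]
              simp
            · -- digit index not followed by a timestamp: resume at the next line
              rw [show pvALoop (l :: l2 :: rest2) = pvALoop (l2 :: rest2) from by
                rw [pvALoop.eq_def]; simp [hd, ha]]
              simp only [List.map_cons]
              rw [show pvGroups cur (PySem.Chars.strip l :: PySem.Chars.strip l2 ::
                    List.map PySem.Chars.strip rest2)
                  = pvGroups (cur ++ [PySem.Chars.strip l])
                    (List.map PySem.Chars.strip (l2 :: rest2)) from by simp [pvGroups, h0]]
              exact ih (l2 :: rest2) _ (by simpa using hrest) hcur'
        · by_cases ha : PySem.Chars.isIn ['-', '-', '>'] (PySem.Chars.strip l) = true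
          · -- bare timestamp line
            rw [show pvALoop (l :: rest)
                = PySem.Chars.replace (PySem.Chars.strip l) [','] ['.'] ::
                  ((pvCollectA rest).1 ++ [[]] ++ pvALoop (pvCollectA rest).2) from by
              rw [pvALoop.eq_def]; simp [hd, ha]]
            simp only [List.map_cons]
            rw [show pvGroups cur (PySem.Chars.strip l :: List.map PySem.Chars.strip rest)
                = pvGroups (cur ++ [PySem.Chars.strip l])
                  (List.map PySem.Chars.strip rest) from by simp [pvGroups, h0]]
            rw [pvGroups_run rest _ (by simp)]
            rw [List.flatMap_cons]
            rw [show cur ++ [PySem.Chars.strip l] ++ (pvCollectA rest).1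
                = cur ++ (PySem.Chars.strip l :: (pvCollectA rest).1) from by simp]
            rw [pvEmitBlock_append _ _ hcur]
            simp only [pvEmitBlock, ha, if_true]
            rw [tail rest hrest]
            simp
          · -- ordinary skipped line
            rw [show pvALoop (l :: rest) = pvALoop rest from by
              rw [pvALoop.eq_def]; simp [hd, ha]]
            simp only [List.map_cons]
            rw [show pvGroups cur (PySem.Chars.strip l :: List.map PySem.Chars.strip rest)
                = pvGroups (cur ++ [PySem.Chars.strip l])
                  (List.map PySem.Chars.strip rest) from by simp [pvGroups, h0]]
            exact ih rest _ hrest (by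
              intro s hs
              rcases List.mem_append.mp hs with h | h
              · exact hcur s h
              · simp at h; subst h; simpa using ha)

-- ===== VERDICT (by name: the statement is the Claim_ definition above) =====
theorem srt_to_vtt_spec : Claim_equal_srt_to_vtt := by
  intro s _
  unfold Spec_srt_to_vtt srt_to_vtt srt_to_vtt_alt pvBlocks
  rw [PySem.List.foldl_append_eq_flatMap, pvBlocks_foldl _ [] []]
  rw [pvMain ((PySem.Chars.splitOn (PySem.Chars.strip s.toList) ['\n']).length) _ [] le_rfl (by simp)]
  rfl
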